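-- pv_equiv track=rewrite | github.com/MaTaha-ualr/hybrid-entity-resolution-historical-records | z_Taha_Code/hm_taha_modules/cell08.py | find_most_complete_address
-- ===== SOURCE A (Python) =====
-- from typing import List, Dict, Tuple, Optional
--
-- def find_most_complete_address(candidates: List[str]) -> Optional[str]:
--     """
--     Find address with most components (house number, street, city, state, zip).
--     """
--     def count_address_components(addr: str) -> int:
--         # Simple heuristic: count likely address components
--         parts = addr.strip().split()
--         components = 0
--
--         # Check for house number (starts with digit)
--         if parts and parts[0][0].isdigit():
--             components += 1
--
--         # Check for state (2-letter word, often near end)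
--         for part in parts:
--             if len(part) == 2 and part.isalpha():
--                 components += 1
--                 break
--
--         # Check for ZIP (5 or 9 digits, possibly with dash)
--         for part in parts:
--             if part.replace('-', '').isdigit() and len(part.replace('-', '')) in [5, 9]:
--                 components += 1
--                 break
--
--         # Remaining parts likely street name and city
--         remaining_parts = len(parts) - components
--         if remaining_parts >= 2:  # At least street and city
--             components += 2
--         elif remaining_parts == 1:
--             components += 1
--
--         return components
--
--     if not candidates:
--         return None
--
--     # Find candidate with most components
--     scored_candidates = [(c, count_address_components(c)) for c in candidates]
--     max_score = max(score for _, score in scored_candidates)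
--
--     # Check if there's a clear winner
--     winners = [c for c, score in scored_candidates if score == max_score]
--     if len(winners) == 1 and max_score > 2:  # At least 3 components
--         return winners[0]
--
--     return None
-- ===== SOURCE B (Python) =====
-- from typing import List, Optional
--
--
-- def find_most_complete_address(candidates: List[str]) -> Optional[str]:
--     """Single streaming pass: track best score, first best candidate, tie count."""
--
--     def count_address_components(addr: str) -> int:
--         # Simple heuristic: count likely address components (unchanged from A)
--         parts = addr.strip().split()
--         components = 0
--         if parts and parts[0][0].isdigit():
--             components += 1
--         for part in parts:
--             if len(part) == 2 and part.isalpha():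
--                 components += 1
--                 break
--         for part in parts:
--             if part.replace('-', '').isdigit() and len(part.replace('-', '')) in [5, 9]:
--                 components += 1
--                 break
--         remaining_parts = len(parts) - components
--         if remaining_parts >= 2:
--             components += 2
--         elif remaining_parts == 1:
--             components += 1
--         return components
--
--     best_score = -1
--     best_candidate = None
--     tie_count = 0
--     for c in candidates:
--         s = count_address_components(c)
--         if s > best_score:
--             best_score, best_candidate, tie_count = s, c, 1
--         elif s == best_score:
--             tie_count += 1
--     if tie_count == 1 and best_score > 2:
--         return best_candidate
--     return None
-- ===== Notes on version B (the rewrite author's own statement) =====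
-- stated objective: alternative
-- what changed: The three-pass selection (score every candidate into a list, take max over it, rebuild the winners list, then test uniqueness and threshold) is replaced by one streaming fold that keeps only best_score, the first best candidate and a tie counter, so no intermediate scored/winners lists are built.
import Mathlib
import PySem

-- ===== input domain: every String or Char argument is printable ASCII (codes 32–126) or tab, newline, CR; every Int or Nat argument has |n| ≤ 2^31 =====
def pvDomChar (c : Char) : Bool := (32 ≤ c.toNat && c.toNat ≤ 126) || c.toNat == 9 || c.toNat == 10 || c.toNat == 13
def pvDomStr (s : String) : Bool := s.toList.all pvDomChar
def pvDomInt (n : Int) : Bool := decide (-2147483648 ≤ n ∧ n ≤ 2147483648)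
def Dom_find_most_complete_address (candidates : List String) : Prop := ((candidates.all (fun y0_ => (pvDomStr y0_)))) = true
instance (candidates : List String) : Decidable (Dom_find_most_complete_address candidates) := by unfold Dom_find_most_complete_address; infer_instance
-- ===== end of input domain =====

-- B replaces A's three passes (score list, max over it, winners list, uniqueness check) by one
-- streaming fold keeping best score / first best candidate / tie count (objective: alternative).


-- ===== PORT A =====
-- Helper count_address_components (identical in A and in B, which keeps it unchanged).
-- parts[0][0] is ported via pyGet?; split₀ never yields an empty word, so the none
-- branch (Python's IndexError) is unreachable and scored 0.
def countComponents (addr : String) : Int :=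
  let parts := PySem.Str.split₀ (PySem.Str.strip addr)
  let c1 : Int :=
    match parts with
    | [] => 0
    | p :: _ =>
      match PySem.Str.pyGet? p 0 with
      | some ch => if PySem.Chars.isdigit ch then 1 else 0
      | none => 0
  let c2 : Int := if parts.any (fun p => PySem.Str.len p == 2 && PySem.Str.strIsalpha p) then 1 else 0
  let c3 : Int := if parts.any (fun p =>
      PySem.Str.strIsdigit (PySem.Str.replace p "-" "") &&
      (PySem.Str.len (PySem.Str.replace p "-" "") == 5 ||
       PySem.Str.len (PySem.Str.replace p "-" "") == 9)) then 1 else 0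
  let components := c1 + c2 + c3
  let remaining : Int := (parts.length : Int) - components
  if remaining ≥ 2 then components + 2
  else if remaining = 1 then components + 1
  else components

def find_most_complete_address (candidates : List String) : Option String :=
  if candidates = [] then none
  else
    let scored := candidates.map (fun c => (c, countComponents c))
    match PySem.List.max? (scored.map (fun p => p.2)) (fun y => y) with
    | none => none   -- unreachable: candidates ≠ [] so the score list is nonempty
    | some maxScore =>
      let winners := (scored.filter (fun p => p.2 == maxScore)).map (fun p => p.1)
      if winners.length = 1 ∧ maxScore > 2 then PySem.List.pyGet? winners 0 else none

-- ===== PORT B =====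
-- B's loop body, named so the proofs can speak about one step.
def pvStep (acc : Int × Option String × Int) (c : String) : Int × Option String × Int :=
  let s := countComponents c
  if s > acc.1 then (s, some c, 1)
  else if s = acc.1 then (acc.1, acc.2.1, acc.2.2 + 1)
  else acc

def find_most_complete_address_alt (candidates : List String) : Option String :=
  let st := candidates.foldl pvStep (-1, none, 0)
  if st.2.2 = 1 ∧ st.1 > 2 then st.2.1 else none

-- ===== PRECONDITION & SPEC =====
def Spec_find_most_complete_address (candidates : List String) (out : Option String) : Prop := out = find_most_complete_address_alt candidates
instance (candidates : List String) (out : Option String) : Decidable (Spec_find_most_complete_address candidates out) := by unfold Spec_find_most_complete_address; infer_instance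

-- ===== CLAIM (what is proved, stated in full; the proofs are below) =====
def Claim_equal_find_most_complete_address : Prop := ∀ (candidates : List String), Dom_find_most_complete_address candidates → Spec_find_most_complete_address candidates (find_most_complete_address candidates)

-- ===== LEMMAS AND PROOFS =====

-- Each score is nonnegative, so the first candidate always beats B's initial -1.
lemma countComponents_nonneg (addr : String) : 0 ≤ countComponents addr := by
  unfold countComponents
  dsimp only
  repeat' split
  all_goals omega

-- The running maximum of the scores, B's first state component.
def runMax (s : Int) (l : List String) : Int :=
  l.foldl (fun a c => max a (countComponents c)) s

lemma runMax_cons (s : Int) (c : String) (l : List String) :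
    runMax s (c :: l) = runMax (max s (countComponents c)) l := by
  simp only [runMax, List.foldl_cons]

lemma le_runMax (s : Int) (l : List String) :
    s ≤ runMax s l ∧ ∀ c ∈ l, countComponents c ≤ runMax s l :=
  PySem.List.le_foldl_max_int l countComponents s

lemma pyGet?_zero {α : Type} (l : List α) : PySem.List.pyGet? l 0 = l.head? := by
  cases l <;> simp [PySem.List.pyGet?, PySem.List.pyIdx?]

-- Invariant of B's fold from an arbitrary state: either some later score strictly
-- improves on s — then the result is the running max M, the first candidate scoring M,
-- and the number of candidates scoring M — or nothing does and only the tie count grows.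
lemma pvFold_characterize (l : List String) :
    ∀ (s : Int) (b : Option String) (t : Int),
      l.foldl pvStep (s, b, t) =
        (if s < runMax s l then
           (runMax s l,
            (l.filter fun c => decide (countComponents c = runMax s l)).head?,
            ((l.countP fun c => decide (countComponents c = runMax s l)) : Int))
         else (s, b, t + ((l.countP fun c => decide (countComponents c = s)) : Int))) := by
  induction l with
  | nil =>
    intro s b t
    simp only [List.foldl_nil, runMax, List.countP_nil, Nat.cast_zero, add_zero,
      if_neg (lt_irrefl s)]
  | cons c l ih =>
    intro s b t
    obtain ⟨hle1, hle2⟩ := le_runMax s l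
    simp only [List.foldl_cons]
    by_cases h1 : countComponents c > s
    · have hstep : pvStep (s, b, t) c = (countComponents c, some c, 1) := by
        simp [pvStep, h1]
      have hr : runMax s (c :: l) = runMax (countComponents c) l := by
        rw [runMax_cons, max_eq_right (by omega : s ≤ countComponents c)]
      obtain ⟨hc1, hc2⟩ := le_runMax (countComponents c) l
      rw [hstep, ih, hr, if_pos (show s < runMax (countComponents c) l by omega)]
      by_cases h2 : countComponents c < runMax (countComponents c) l
      · have hne : ¬ (countComponents c = runMax (countComponents c) l) := by omega
        rw [if_pos h2]
        simp [hne]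
      · have heq : runMax (countComponents c) l = countComponents c := by omega
        rw [if_neg h2, heq]
        simp
        omega
    · have hstep : pvStep (s, b, t) c =
          (if countComponents c = s then (s, b, t + 1) else (s, b, t)) := by
        by_cases h2 : countComponents c = s <;> simp [pvStep, h1, h2]
      have hr : runMax s (c :: l) = runMax s l := by
        rw [runMax_cons, max_eq_left (by omega : countComponents c ≤ s)]
      rw [hstep, hr]
      by_cases h3 : s < runMax s l
      · have hne : ¬ (countComponents c = runMax s l) := by omega
        have hne' : ¬ (s = runMax s l) := by omega
        by_cases h2 : countComponents c = s
        · rw [if_pos h2, ih, if_pos h3, if_pos h3]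
          simp [hne, List.head?_filter]
        · rw [if_neg h2, ih, if_pos h3, if_pos h3]
          simp [hne]
      · rw [if_neg h3]
        by_cases h2 : countComponents c = s
        · rw [if_pos h2, ih, if_neg h3]
          simp [h2]
          omega
        · rw [if_neg h2, ih, if_neg h3]
          simp [h2]

lemma pv_length_filter {α : Type} (p : α → Bool) (l : List α) :
    (l.filter p).length = l.countP p := Eq.symm List.countP_eq_length_filter

-- A's winners list is candidates filtered on scoring M.
lemma winners_eq (l : List String) (M : Int) :
    ((l.map (fun c => (c, countComponents c))).filter (fun p => p.2 == M)).map
        (fun p => p.1) =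
      l.filter (fun c => decide (countComponents c = M)) := by
  rw [List.filter_map, List.map_map]
  simp [Function.comp_def, beq_eq_decide]

-- ===== VERDICT (by name: the statement is the Claim_ definition above) =====
set_option maxHeartbeats 1600000 in
theorem find_most_complete_address_spec : Claim_equal_find_most_complete_address := by
  unfold Claim_equal_find_most_complete_address
  intro candidates _
  unfold Spec_find_most_complete_address
  cases candidates with
  | nil => decide
  | cons c rest =>
    unfold find_most_complete_address find_most_complete_address_alt
    have hc := countComponents_nonneg c
    have hstep : pvStep (-1, none, 0) c = (countComponents c, some c, 1) := by
      have h1 : countComponents c > -1 := by omega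
      simp [pvStep, h1]
    have hmax : PySem.List.max?
        (((c :: rest).map (fun c => (c, countComponents c))).map (fun p => p.2))
        (fun y => y) = some (runMax (countComponents c) rest) := by
      simp only [List.map_cons, List.map_map, Function.comp_def]
      rw [PySem.List.max?_id_cons, List.foldl_map]
      simp only [runMax]
    obtain ⟨hc1, hc2⟩ := le_runMax (countComponents c) rest
    simp only [List.foldl_cons, hstep, pvFold_characterize,
      if_neg (List.cons_ne_nil c rest), hmax, winners_eq]
    by_cases h2 : countComponents c < runMax (countComponents c) rest
    · rw [if_pos h2]
      dsimp only
      have hne : ¬ (countComponents c = runMax (countComponents c) rest) := by omega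
      rw [List.filter_cons_of_neg (by simpa using hne)]
      rw [pv_length_filter]
      split_ifs with hA hB hB
      · exact pyGet?_zero _
      · exact absurd ⟨by exact_mod_cast hA.1, hA.2⟩ hB
      · exact absurd ⟨by exact_mod_cast hB.1, hB.2⟩ hA
      · rfl
    · have heq : runMax (countComponents c) rest = countComponents c := by omega
      rw [if_neg h2, heq]
      dsimp only
      rw [List.filter_cons_of_pos
        (p := fun c1 => decide (countComponents c1 = countComponents c))
        (a := c) (l := rest) (by exact decide_eq_true rfl),
        List.length_cons, pv_length_filter]
      refine if_congr ⟨fun h => ⟨by omega, h.2⟩, fun h => ⟨by omega, h.2⟩⟩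
        (by rw [pyGet?_zero]; rfl) rfl
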